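-- pv_equiv track=rewrite | github.com/nirajanDevHub108/PythonDSA | Leetcode/pyramidTransition-29-12-25.py | pyramid_possible
-- ===== SOURCE A (Python) =====
-- def pyramid_possible(bottom, allowed):
--     from collections import defaultdict
--     allowed_map = defaultdict(list)
--     for a, b, c in allowed:
--         allowed_map[(a, b)].append(c)
--
--     memo = set()  # stores rows that are impossible
--
--     def can_build(row):
--             # If we already know this row fails
--         if row in memo:
--             return False
--
--             # Base case
--         if len(row) == 1:
--             return True
--
--         def dfs(next_row, idx):
--             if idx == len(row) - 1:
--                 return can_build(next_row)
--
--             pair = (row[idx], row[idx + 1])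
--             if pair not in allowed_map:
--                 return False
--
--             for ch in allowed_map[pair]:
--                 if dfs(next_row + ch, idx + 1):
--                     return True
--             return False
--
--         possible = dfs("", 0)
--         if not possible:
--             memo.add(row)  # cache failure
--         return possible
--
--     return can_build(bottom)
-- ===== SOURCE B (Python) =====
-- from itertools import product
--
-- def pyramid_possible(bottom, allowed):
--     allowed_map = {}
--     for a, b, c in allowed:
--         allowed_map.setdefault((a, b), []).append(c)
--
--     memo = set()  # rows known to be impossible
--
--     def can_build(row):
--         if row in memo:
--             return False
--         if len(row) == 1:
--             return True
--         options = [allowed_map.get((row[i], row[i + 1]), []) for i in range(len(row) - 1)]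
--         for combo in product(*options):
--             if can_build(''.join(combo)):
--                 return True
--         memo.add(row)
--         return False
--
--     return can_build(bottom)
-- ===== Notes on version B (the rewrite author's own statement) =====
-- stated objective: idiomatic
-- what changed: Replaces A's character-by-character dfs recursion (building next_row one char at a time with an index) by precomputing the per-position options table and enumerating whole candidate next rows with itertools.product, keeping the same allowed_map and failure memo.
import Mathlib
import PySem

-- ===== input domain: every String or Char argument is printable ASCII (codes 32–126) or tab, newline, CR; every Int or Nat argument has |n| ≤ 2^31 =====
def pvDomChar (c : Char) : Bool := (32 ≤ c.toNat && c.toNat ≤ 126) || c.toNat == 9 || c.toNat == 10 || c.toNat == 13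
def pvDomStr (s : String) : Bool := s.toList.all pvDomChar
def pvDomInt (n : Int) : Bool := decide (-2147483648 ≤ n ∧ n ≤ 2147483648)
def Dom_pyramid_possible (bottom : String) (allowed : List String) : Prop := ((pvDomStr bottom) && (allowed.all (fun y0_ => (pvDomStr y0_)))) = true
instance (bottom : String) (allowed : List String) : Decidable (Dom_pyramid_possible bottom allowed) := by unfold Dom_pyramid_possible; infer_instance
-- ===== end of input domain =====

-- B replaces A's character-by-character dfs recursion with an options-table + product enumeration
-- (itertools.product) producing whole next rows; objective: idiomatic decomposition, same cost.
-- Fuel arguments in both ports are plain termination fuel (depth = |row|); they never run out on admitted inputs.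

-- ===== PORT A =====
def buildMapA (allowed : List String) : PySem.Dict (Char × Char) (List Char) :=
  allowed.foldl (fun am s =>
    match s.toList with
    | [a, b, c] => am.modify (a, b) [] (· ++ [c])   -- allowed_map[(a,b)].append(c) (defaultdict)
    | _ => am) PySem.Dict.empty                      -- <3 or >3 chars: Python raises, outside Pre_

-- the 'for ch in allowed_map[pair]' loop of dfs
def tryA (step : List Char → PySem.Set (List Char) → Bool × PySem.Set (List Char))
    (next : List Char) :
    List Char → PySem.Set (List Char) → Bool × PySem.Set (List Char)
  | [], memo => (false, memo)
  | ch :: rest, memo =>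
    match step (next ++ [ch]) memo with
    | (true, m') => (true, m')
    | (false, m') => tryA step next rest m'

-- dfs(next_row, idx); g is fuel (= |row| - idx on every real call)
def dfsA (am : PySem.Dict (Char × Char) (List Char))
    (cb : List Char → PySem.Set (List Char) → Bool × PySem.Set (List Char)) :
    Nat → List Char → List Char → Nat → PySem.Set (List Char) → Bool × PySem.Set (List Char)
  | 0, _, _, _, memo => (false, memo)
  | g + 1, row, next, idx, memo =>
    if idx == row.length - 1 then cb next memo
    else
      match am.get? (row.getD idx ' ', row.getD (idx + 1) ' ') with
      | none => (false, memo)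
      | some cs => tryA (fun nx m => dfsA am cb g row nx (idx + 1) m) next cs memo

-- can_build(row), threading the mutable failure memo; f is fuel (= |row| on every real call)
def canBuildA (am : PySem.Dict (Char × Char) (List Char)) :
    Nat → List Char → PySem.Set (List Char) → Bool × PySem.Set (List Char)
  | 0, _, memo => (false, memo)
  | f + 1, row, memo =>
    if memo.contains row then (false, memo)
    else if row.length == 1 then (true, memo)
    else
      match dfsA am (fun r m => canBuildA am f r m) row.length row [] 0 memo with
      | (true, m') => (true, m')
      | (false, m') => (false, PySem.Set.add m' row)

def pyramid_possible (bottom : String) (allowed : List String) : Bool :=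
  (canBuildA (buildMapA allowed) bottom.toList.length bottom.toList PySem.Set.empty).1

-- ===== PORT B =====
def buildMapB : List String → PySem.Dict (Char × Char) (List Char) → PySem.Dict (Char × Char) (List Char)
  | [], am => am
  | s :: rest, am =>
    match s.toList with
    | [a, b, c] => buildMapB rest (am.insert (a, b) (am.getD (a, b) [] ++ [c]))  -- setdefault(...).append(c)
    | _ => buildMapB rest am                         -- <3 or >3 chars: Python raises, outside Pre_

-- itertools.product(*options)
def productB : List (List Char) → List (List Char)
  | [] => [[]]
  | o :: os => o.flatMap fun c => (productB os).map fun t => c :: t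

-- 'for combo in product(...): if can_build(join(combo)): return True'
def loopB (cb : List Char → PySem.Set (List Char) → Bool × PySem.Set (List Char)) :
    List (List Char) → PySem.Set (List Char) → Bool × PySem.Set (List Char)
  | [], memo => (false, memo)
  | r :: rs, memo =>
    match cb r memo with
    | (true, m') => (true, m')
    | (false, m') => loopB cb rs m'

def canBuildB (am : PySem.Dict (Char × Char) (List Char)) :
    Nat → List Char → PySem.Set (List Char) → Bool × PySem.Set (List Char)
  | 0, _, memo => (false, memo)
  | f + 1, row, memo =>
    if memo.contains row then (false, memo)
    else if row.length == 1 then (true, memo)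
    else
      let options := (List.range (row.length - 1)).map fun i =>
        am.getD (row.getD i ' ', row.getD (i + 1) ' ') []
      match loopB (fun r m => canBuildB am f r m) (productB options) memo with
      | (true, m') => (true, m')
      | (false, m') => (false, PySem.Set.add m' row)

def pyramid_possible_alt (bottom : String) (allowed : List String) : Bool :=
  (canBuildB (buildMapB allowed PySem.Dict.empty) bottom.toList.length bottom.toList PySem.Set.empty).1

-- ===== PRECONDITION & SPEC =====
-- Pre_ excludes exactly the inputs where Python A raises: empty bottom (IndexError in dfs)
-- and allowed entries whose length is not 3 (ValueError unpacking 'a, b, c').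
def Pre_pyramid_possible (bottom : String) (allowed : List String) : Prop :=
  bottom.toList ≠ [] ∧ ∀ s ∈ allowed, s.toList.length = 3
instance (bottom : String) (allowed : List String) : Decidable (Pre_pyramid_possible bottom allowed) := by
  unfold Pre_pyramid_possible; infer_instance

def pvWitness_pyramid_possible : String × List String := ("BCD", ["BCC", "CDE", "CEA", "FFF"])

def Spec_pyramid_possible (bottom : String) (allowed : List String) (out : Bool) : Prop := out = pyramid_possible_alt bottom allowed
instance (bottom : String) (allowed : List String) (out : Bool) : Decidable (Spec_pyramid_possible bottom allowed out) := by unfold Spec_pyramid_possible; infer_instance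

-- ===== CLAIM (what is proved, stated in full; the proofs are below) =====
def Claim_equal_pyramid_possible : Prop := ∀ (bottom : String) (allowed : List String), Dom_pyramid_possible bottom allowed → Pre_pyramid_possible bottom allowed → Spec_pyramid_possible bottom allowed (pyramid_possible bottom allowed)

-- ===== LEMMAS AND PROOFS =====

-- the two map-building loops produce the same dict
theorem buildMapB_foldl (l : List String) :
    ∀ am, buildMapB l am =
      l.foldl (fun am s =>
        match s.toList with
        | [a, b, c] => am.modify (a, b) [] (· ++ [c])
        | _ => am) am := by
  induction l with
  | nil => intro am; rfl
  | cons s rest ih =>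
    intro am
    simp only [List.foldl_cons]
    show (match s.toList with
          | [a, b, c] => buildMapB rest (am.insert (a, b) (am.getD (a, b) [] ++ [c]))
          | _ => buildMapB rest am) = _
    rcases hx : s.toList with _ | ⟨a, _ | ⟨b, _ | ⟨c, _ | ⟨d, t⟩⟩⟩⟩ <;>
      (simp only [ih]; try rfl)

theorem buildMap_eq (allowed : List String) :
    buildMapB allowed PySem.Dict.empty = buildMapA allowed :=
  buildMapB_foldl allowed PySem.Dict.empty

theorem loopB_append (cb : List Char → PySem.Set (List Char) → Bool × PySem.Set (List Char))
    (l₁ l₂ : List (List Char)) (memo : PySem.Set (List Char)) :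
    loopB cb (l₁ ++ l₂) memo =
      match loopB cb l₁ memo with
      | (true, m') => (true, m')
      | (false, m') => loopB cb l₂ m' := by
  induction l₁ generalizing memo with
  | nil => simp [loopB]
  | cons r rs ih =>
    simp only [List.cons_append, loopB]
    rcases hc : cb r memo with ⟨b, m'⟩
    cases b <;> simp [ih]

-- the option lists for positions idx .. |row|-2
def optsFrom (am : PySem.Dict (Char × Char) (List Char)) (row : List Char) (idx : Nat) :
    List (List Char) :=
  (List.range' idx (row.length - 1 - idx)).map fun i =>
    am.getD (row.getD i ' ', row.getD (i + 1) ' ') []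

theorem tryA_eq (cb step : List Char → PySem.Set (List Char) → Bool × PySem.Set (List Char))
    (rest : List (List Char))
    (hstep : ∀ nx m, step nx m = loopB cb ((productB rest).map (nx ++ ·)) m) :
    ∀ (cs : List Char) (next : List Char) (memo : PySem.Set (List Char)),
      tryA step next cs memo =
        loopB cb ((cs.flatMap fun c => (productB rest).map fun t => c :: t).map (next ++ ·)) memo := by
  intro cs
  induction cs with
  | nil => intro next memo; simp [tryA, loopB]
  | cons ch cs' ih =>
    intro next memo
    have hmap : ((productB rest).map fun t => ch :: t).map (next ++ ·) =
        (productB rest).map ((next ++ [ch]) ++ ·) := by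
      rw [List.map_map]
      exact List.map_congr_left fun t _ => by
        simp only [Function.comp_apply]
        exact List.append_cons next ch t
    simp only [tryA, List.flatMap_cons, List.map_append, hmap]
    rw [loopB_append, ← hstep]
    rcases hs : step (next ++ [ch]) memo with ⟨b, m'⟩
    cases b <;> simp [ih]

theorem optsFrom_cons (am : PySem.Dict (Char × Char) (List Char)) (row : List Char)
    (idx : Nat) (h : idx < row.length - 1) :
    optsFrom am row idx =
      am.getD (row.getD idx ' ', row.getD (idx + 1) ' ') [] :: optsFrom am row (idx + 1) := by
  unfold optsFrom
  have hn : row.length - 1 - idx = (row.length - 1 - (idx + 1)) + 1 := by omega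
  rw [hn, List.range'_succ]
  simp

theorem dfsA_eq (am : PySem.Dict (Char × Char) (List Char))
    (cb : List Char → PySem.Set (List Char) → Bool × PySem.Set (List Char)) :
    ∀ (g : Nat) (row next : List Char) (idx : Nat) (memo : PySem.Set (List Char)),
      idx + g = row.length → idx < row.length →
      dfsA am cb g row next idx memo =
        loopB cb ((productB (optsFrom am row idx)).map (next ++ ·)) memo := by
  intro g
  induction g with
  | zero => intro row next idx memo h1 h2; omega
  | succ g ih =>
    intro row next idx memo h1 h2
    by_cases hidx : idx = row.length - 1
    · have hz : row.length - 1 - idx = 0 := by omega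
      simp only [dfsA, hidx, beq_self_eq_true, if_true]
      unfold optsFrom
      simp only [Nat.sub_self, List.range'_zero, List.map_nil, productB, List.map_cons,
        List.map_nil, List.append_nil]
      rcases hc : cb next memo with ⟨b, m'⟩
      cases b <;> simp [loopB, hc]
    · have hlt : idx < row.length - 1 := by omega
      have hne : (idx == row.length - 1) = false := by simp [hidx]
      simp only [dfsA, hne, Bool.false_eq_true, if_false]
      rw [optsFrom_cons am row idx hlt]
      rcases hg : am.get? (row.getD idx ' ', row.getD (idx + 1) ' ') with _ | cs
      · have : am.getD (row.getD idx ' ', row.getD (idx + 1) ' ') [] = [] := by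
          simp only [PySem.Dict.getD, hg, Option.getD_none]
        rw [this]
        simp [productB, loopB]
      · have hgd : am.getD (row.getD idx ' ', row.getD (idx + 1) ' ') [] = cs := by
          simp only [PySem.Dict.getD, hg, Option.getD_some]
        rw [hgd]
        simp only [productB]
        exact tryA_eq cb _ (optsFrom am row (idx + 1))
          (fun nx m => ih row nx (idx + 1) m (by omega) (by omega)) cs next memo

theorem canBuildB_nil (am : PySem.Dict (Char × Char) (List Char)) :
    ∀ (f : Nat) (memo : PySem.Set (List Char)), memo.contains [] = false →
      canBuildB am f [] memo =
        (false, if f = 0 then memo else PySem.Set.add memo []) := by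
  intro f
  induction f with
  | zero => intro memo h; rfl
  | succ f ih =>
    intro memo h
    simp only [canBuildB, h, Bool.false_eq_true, if_false, List.length_nil]
    norm_num
    simp only [productB, loopB]
    rw [ih memo h]
    rcases Nat.eq_zero_or_pos f with hf | hf
    · simp [hf]
    · have : f ≠ 0 := by omega
      simp [this]

theorem canBuild_eq (am : PySem.Dict (Char × Char) (List Char)) :
    ∀ (f : Nat) (row : List Char) (memo : PySem.Set (List Char)),
      canBuildA am f row memo = canBuildB am f row memo := by
  intro f
  induction f with
  | zero => intro row memo; rfl
  | succ f ih =>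
    intro row memo
    have hfun : (fun r m => canBuildA am f r m) = (fun r m => canBuildB am f r m) :=
      funext fun r => funext fun m => ih r m
    rcases hc : PySem.Set.contains memo row with _ | _
    · rcases hl : (row.length == 1) with _ | _
      · rcases row with _ | ⟨c, rtl⟩
        · -- row = []: A's dfs runs out of fuel at once; B recurses through the singleton product
          simp only [canBuildA, canBuildB, hc, Bool.false_eq_true, if_false,
            List.length_nil, dfsA]
          norm_num
          simp only [productB, loopB]
          rw [canBuildB_nil am f memo hc]
          rcases Nat.eq_zero_or_pos f with hf | hf
          · simp [hf]
          · have : f ≠ 0 := by omega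
            simp [this]
        · have hpos : 0 < (c :: rtl).length := by simp
          simp only [canBuildA, canBuildB, hc, hl, Bool.false_eq_true, if_false]
          rw [hfun, dfsA_eq am _ (c :: rtl).length (c :: rtl) [] 0 memo (by omega) hpos]
          unfold optsFrom
          simp [List.range_eq_range']
      · simp [canBuildA, canBuildB, hl]
    · have hm : row ∈ memo := by simpa [PySem.Set.contains] using hc
      simp [canBuildA, canBuildB, hm]

-- ===== VERDICT (by name: the statement is the Claim_ definition above) =====
theorem pyramid_possible_spec : Claim_equal_pyramid_possible := by
  intro bottom allowed _ _
  unfold Spec_pyramid_possible pyramid_possible pyramid_possible_alt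
  rw [buildMap_eq, canBuild_eq]
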